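-- pv_equiv track=rewrite | github.com/chariotsofiron/cookbook | python/combinatorics/permutation_index.py | index_to_permutation
-- ===== SOURCE A (Python) =====
-- import math
--
-- def multi_factorial(n: int, divisors: list[int]) -> int:
--     """Returns the multi-factorial of n with divisors."""
--     return math.factorial(n) // math.prod(math.factorial(d) for d in divisors)
--
-- def index_to_permutation(index: int, counts: list[int]) -> tuple[int, ...]:
--     """Returns the permutation of a sequence given its index.
--
--     Supports duplicates.
--     """
--     n = sum(counts)
--     permutation = []
--     for i in range(n):
--         for j in range(len(counts)):
--             if counts[j] > 0:
--                 counts[j] -= 1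
--                 n_perms = multi_factorial(n - i - 1, counts)
--                 if n_perms <= index:
--                     index -= n_perms
--                 else:
--                     permutation.append(j)
--                     break
--                 counts[j] += 1
--     return tuple(permutation)
-- ===== SOURCE B (Python) =====
-- def index_to_permutation(index, counts):
--     """Decode the multiset permutation with the given lexicographic index.
--
--     Same return value as A; unlike A it does not mutate `counts`.
--     Keeps a running numerator f = (n-i-1)! and denominator prod(c!) that are
--     updated by one division/multiplication per step instead of recomputing
--     factorials and the product for every candidate symbol.
--     """
--     n = sum(counts)
--     if n <= 0:
--         return ()
--     denom = 1
--     for c in counts: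
--         for m in range(2, c + 1):
--             denom *= m
--     f = 1
--     for m in range(2, n):
--         f *= m  # f = (n-1)!
--     cnts = list(counts)
--     perm = []
--     for i in range(n):
--         for j in range(len(cnts)):
--             c = cnts[j]
--             if c > 0:
--                 d = denom // c
--                 n_perms = f // d
--                 if n_perms <= index:
--                     index -= n_perms
--                 else:
--                     perm.append(j)
--                     cnts[j] = c - 1
--                     denom = d
--                     break
--         if i < n - 1:
--             f //= n - i - 1
--     return tuple(perm)
-- ===== Notes on version B (the rewrite author's own statement) =====
-- stated objective: alternative
-- what changed: B replaces the per-candidate recomputation of factorial(n-i-1) and the product of count-factorials by a running numerator f=(n-i-1)! and denominator prod(c!), each updated with a single division per step; B also does not mutate the counts argument.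
import Mathlib
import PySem

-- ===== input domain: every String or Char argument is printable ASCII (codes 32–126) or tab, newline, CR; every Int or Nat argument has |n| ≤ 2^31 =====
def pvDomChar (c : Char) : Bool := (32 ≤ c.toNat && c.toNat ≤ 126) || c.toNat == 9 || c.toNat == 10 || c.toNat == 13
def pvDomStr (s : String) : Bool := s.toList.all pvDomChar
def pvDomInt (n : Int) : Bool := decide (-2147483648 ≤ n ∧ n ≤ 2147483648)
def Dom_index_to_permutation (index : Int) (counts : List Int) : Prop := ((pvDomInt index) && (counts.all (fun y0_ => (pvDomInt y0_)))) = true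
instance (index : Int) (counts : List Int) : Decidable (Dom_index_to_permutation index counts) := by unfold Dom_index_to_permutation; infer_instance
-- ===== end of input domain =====

-- B replaces the per-candidate factorial/product recomputation by a running numerator (n-i-1)! and
-- denominator prod(c!), each updated with one division per step (an alternative, incremental
-- algorithm); equivalence is about the RETURN value: Python A mutates `counts` in place (picked
-- symbols stay decremented), B does not.

-- ===== PORT A =====
-- math.factorial; exact for nonnegative arguments (Python raises ValueError on negatives,
-- which Pre_ excludes from the claim)
def pyFact (m : Int) : Int := (Nat.factorial m.toNat : Int)

def multi_factorial (n : Int) (divisors : List Int) : Int :=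
  PySem.Int.floordiv (pyFact n) (divisors.foldl (fun a d => a * pyFact d) 1)

-- inner `for j in range(len(counts))` loop with its break, returning (index, counts, permutation)
def innerA (idx : Int) (counts : List Int) (m : Int) (j : Nat) (perm : List Int) :
    Int × List Int × List Int :=
  if h : j < counts.length then
    let c := counts[j]
    if 0 < c then
      let counts1 := counts.set j (c - 1)
      let np := multi_factorial m counts1
      if np ≤ idx then innerA (idx - np) (counts1.set j c) m (j + 1) perm
      else (idx, counts1, perm ++ [(j : Int)])
    else innerA idx counts m (j + 1) perm
  else (idx, counts, perm)
  termination_by counts.length - j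
  decreasing_by all_goals (try simp only [List.length_set]); omega

-- outer `for i in range(n)` loop
def outerA (steps : Nat) (idx : Int) (counts : List Int) (n i : Int) (perm : List Int) : List Int :=
  match steps with
  | 0 => perm
  | Nat.succ s =>
    let r := innerA idx counts (n - i - 1) 0 perm
    outerA s r.1 r.2.1 n (i + 1) r.2.2

def index_to_permutation (index : Int) (counts : List Int) : List Int :=
  let n := counts.foldl (· + ·) 0
  outerA n.toNat index counts n 0 []

-- ===== PORT B =====
-- inner loop of B: denom = prod of factorials of current counts, f = (n-i-1)!
def innerB (idx : Int) (cnts : List Int) (denom f : Int) (j : Nat) (perm : List Int) :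
    Int × List Int × Int × List Int :=
  if h : j < cnts.length then
    let c := cnts[j]
    if 0 < c then
      let d := PySem.Int.floordiv denom c
      let np := PySem.Int.floordiv f d
      if np ≤ idx then innerB (idx - np) cnts denom f (j + 1) perm
      else (idx, cnts.set j (c - 1), d, perm ++ [(j : Int)])
    else innerB idx cnts denom f (j + 1) perm
  else (idx, cnts, denom, perm)
  termination_by cnts.length - j

def outerB (steps : Nat) (idx : Int) (cnts : List Int) (denom f : Int) (n i : Int)
    (perm : List Int) : List Int :=
  match steps with
  | 0 => perm
  | Nat.succ s =>
    let r := innerB idx cnts denom f 0 perm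
    let f' := if i < n - 1 then PySem.Int.floordiv f (n - i - 1) else f
    outerB s r.1 r.2.1 r.2.2.1 f' n (i + 1) r.2.2.2

def index_to_permutation_alt (index : Int) (counts : List Int) : List Int :=
  let n := counts.foldl (· + ·) 0
  if n ≤ 0 then []
  else
    let denom := counts.foldl (fun a c => (PySem.List.pyRange 2 (c + 1) 1).foldl (· * ·) a) 1
    let f := (PySem.List.pyRange 2 n 1).foldl (· * ·) 1
    outerB n.toNat index counts denom f n 0 []

-- ===== PRECONDITION & SPEC =====
-- Exactly the inputs on which Python A returns: with a negative count and positive total,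
-- A calls math.factorial on a negative number and raises ValueError; if the total is ≤ 0
-- the loop body never runs and A returns () even with negative counts.
def Pre_index_to_permutation (index : Int) (counts : List Int) : Prop :=
  (∀ c ∈ counts, 0 ≤ c) ∨ counts.sum ≤ 0

instance (index : Int) (counts : List Int) : Decidable (Pre_index_to_permutation index counts) := by
  unfold Pre_index_to_permutation; infer_instance

def pvWitness_index_to_permutation : Int × List Int := (3, [1, 2, 1])

def Spec_index_to_permutation (index : Int) (counts : List Int) (out : List Int) : Prop := out = index_to_permutation_alt index counts
instance (index : Int) (counts : List Int) (out : List Int) : Decidable (Spec_index_to_permutation index counts out) := by unfold Spec_index_to_permutation; infer_instance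

-- ===== CLAIM (what is proved, stated in full; the proofs are below) =====
def Claim_equal_index_to_permutation : Prop := ∀ (index : Int) (counts : List Int), Dom_index_to_permutation index counts → Pre_index_to_permutation index counts → Spec_index_to_permutation index counts (index_to_permutation index counts)

-- ===== LEMMAS AND PROOFS =====

def prodFact (l : List Int) : Int := (l.map pyFact).prod

lemma pyFact_pos (m : Int) : 0 < pyFact m := by
  simpa [pyFact] using Nat.factorial_pos m.toNat

lemma pyFact_succ (c : Int) (hc : 0 < c) : pyFact c = c * pyFact (c - 1) := by
  have h1 : c.toNat = (c - 1).toNat + 1 := by omega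
  simp only [pyFact, h1, Nat.factorial_succ]
  push_cast
  have : ((c - 1).toNat : Int) = c - 1 := by omega
  rw [this]; ring

lemma pyFact_nonpos (m : Int) (hm : m ≤ 0) : pyFact m = 1 := by
  have : m.toNat = 0 := by omega
  simp [pyFact, this]

-- folding `a * pyFact d` over a list is `a * prodFact`
lemma foldl_pyFact (l : List Int) (a : Int) :
    l.foldl (fun x d => x * pyFact d) a = a * prodFact l := by
  induction l generalizing a with
  | nil => simp [prodFact]
  | cons c t ih => simp [prodFact, ih, List.prod_cons] at *; ring

-- product over 2..c is c! (for every integer c; empty range for c <= 1)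
lemma range_prod (c : Int) (a : Int) :
    (PySem.List.pyRange 2 (c + 1) 1).foldl (· * ·) a = a * pyFact c := by
  rcases le_or_gt c 0 with h0 | h0
  · rw [PySem.List.pyRange_one_eq_nil (by omega)]
    simp [pyFact_nonpos c h0]
  · have h1 : (1 : Int) ≤ c := by omega
    induction c, h1 using Int.le_induction generalizing a with
    | base =>
      rw [PySem.List.pyRange_one_eq_nil (by omega)]
      simp [pyFact]
    | succ c hc1 ih =>
      rw [show c + 1 + 1 = (c + 1) + 1 from rfl,
        PySem.List.pyRange_one_succ_right (by omega), List.foldl_append]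
      rw [ih a (by omega)]
      simp only [List.foldl_cons, List.foldl_nil]
      rw [pyFact_succ (c + 1) (by omega)]
      have : c + 1 - 1 = c := by ring
      rw [this]; ring

-- B's initial denominator is the product of the factorials of the counts
lemma denom_init (l : List Int) (a : Int) :
    l.foldl (fun x c => (PySem.List.pyRange 2 (c + 1) 1).foldl (· * ·) x) a = a * prodFact l := by
  have hfun : (fun (x c : Int) => (PySem.List.pyRange 2 (c + 1) 1).foldl (· * ·) x)
      = fun (x c : Int) => x * pyFact c := by
    funext x c; exact range_prod c x
  rw [hfun, foldl_pyFact]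

lemma prodFact_set (l : List Int) (j : Nat) (h : j < l.length) (x : Int) :
    pyFact x * prodFact l = pyFact l[j] * prodFact (l.set j x) := by
  induction l generalizing j with
  | nil => simp at h
  | cons c t ih =>
    cases j with
    | zero => simp [prodFact]; ring
    | succ j =>
      simp only [List.set_cons_succ, List.getElem_cons_succ, prodFact, List.map_cons,
        List.prod_cons] at *
      have hih := ih j (by simpa using h)
      linear_combination pyFact c * hih

-- decrementing one positive count divides the factorial product by that count (exactly)
lemma floordiv_prodFact_dec (l : List Int) (j : Nat) (h : j < l.length) (hc : 0 < l[j]) :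
    PySem.Int.floordiv (prodFact l) l[j] = prodFact (l.set j (l[j] - 1)) := by
  have key : prodFact l = l[j] * prodFact (l.set j (l[j] - 1)) := by
    have h1 := prodFact_set l j h (l[j] - 1)
    have h3 := pyFact_pos (l[j] - 1)
    apply mul_left_cancel₀ (ne_of_gt h3)
    rw [h1, pyFact_succ l[j] hc]; ring
  rw [key, PySem.Int.floordiv_eq_ediv_of_pos hc, Int.mul_ediv_cancel_left _ (by omega)]

-- the inner loops agree: B's (denom, f) represent prodFact cnts and (n-i-1)!
lemma inner_eq (m : Int) : ∀ (k : Nat) (j : Nat) (cnts : List Int) (idx : Int) (perm : List Int),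
    cnts.length - j = k →
    innerB idx cnts (prodFact cnts) (pyFact m) j perm =
      ((innerA idx cnts m j perm).1, (innerA idx cnts m j perm).2.1,
        prodFact (innerA idx cnts m j perm).2.1, (innerA idx cnts m j perm).2.2) := by
  intro k
  induction k with
  | zero =>
    intro j cnts idx perm hk
    have h : ¬ j < cnts.length := by omega
    rw [innerA, innerB]
    simp [h]
  | succ k ih =>
    intro j cnts idx perm hk
    have h : j < cnts.length := by omega
    rw [innerA, innerB]
    simp only [h, dif_pos]
    by_cases hc : 0 < cnts[j]
    · simp only [hc, if_pos]
      have hd : PySem.Int.floordiv (prodFact cnts) cnts[j]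
          = prodFact (cnts.set j (cnts[j] - 1)) := floordiv_prodFact_dec cnts j h hc
      have hnp : PySem.Int.floordiv (pyFact m) (PySem.Int.floordiv (prodFact cnts) cnts[j])
          = multi_factorial m (cnts.set j (cnts[j] - 1)) := by
        rw [hd, multi_factorial, foldl_pyFact]; simp
      rw [hnp]
      by_cases hle : multi_factorial m (cnts.set j (cnts[j] - 1)) ≤ idx
      · simp only [hle, if_pos]
        have hrestore : (cnts.set j (cnts[j] - 1)).set j cnts[j] = cnts := by
          rw [List.set_set, List.set_getElem_self]
        rw [hrestore]
        exact ih (j + 1) cnts _ perm (by omega)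
      · simp only [hle, if_neg, not_false_iff]
        simp [hd]
    · simp only [hc, if_neg, not_false_iff]
      exact ih (j + 1) cnts idx perm (by omega)

-- f is updated to (n-(i+1)-1)! by the guarded division
lemma f_step (n i : Int) (hpos : 1 ≤ n - i) :
    (if i < n - 1 then PySem.Int.floordiv (pyFact (n - i - 1)) (n - i - 1)
     else pyFact (n - i - 1)) = pyFact (n - i - 2) := by
  by_cases hi : i < n - 1
  · rw [if_pos hi]
    have hm : 0 < n - i - 1 := by omega
    rw [pyFact_succ (n - i - 1) hm, PySem.Int.floordiv_eq_ediv_of_pos hm,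
      Int.mul_ediv_cancel_left _ (by omega)]
    congr 1; ring
  · rw [if_neg hi]
    rw [pyFact_nonpos _ (by omega), pyFact_nonpos _ (by omega)]

lemma outer_eq : ∀ (s : Nat) (idx : Int) (cnts : List Int) (n i : Int) (perm : List Int),
    (n - i).toNat = s →
    outerB s idx cnts (prodFact cnts) (pyFact (n - i - 1)) n i perm =
      outerA s idx cnts n i perm := by
  intro s
  induction s with
  | zero => intro idx cnts n i perm _; rfl
  | succ s ih =>
    intro idx cnts n i perm hs
    have hpos : 1 ≤ n - i := by omega
    have hin := inner_eq (n - i - 1) cnts.length 0 cnts idx perm (by omega)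
    simp only [outerA, outerB, hin, f_step n i hpos]
    have harg : pyFact (n - i - 2) = pyFact (n - (i + 1) - 1) := by congr 1; ring
    rw [harg]
    exact ih _ _ n (i + 1) _ (by omega)

-- ===== VERDICT (by name: the statement is the Claim_ definition above) =====
theorem index_to_permutation_spec : Claim_equal_index_to_permutation := by
  intro index counts _ _
  unfold Spec_index_to_permutation index_to_permutation index_to_permutation_alt
  simp only
  by_cases hn : counts.foldl (· + ·) 0 ≤ 0
  · have h0 : (counts.foldl (· + ·) 0).toNat = 0 := by omega
    rw [if_pos hn, h0]
    rfl
  rw [if_neg hn, denom_init, one_mul]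
  have hf : (PySem.List.pyRange 2 (counts.foldl (· + ·) 0) 1).foldl (· * ·) 1
      = pyFact (counts.foldl (· + ·) 0 - 0 - 1) := by
    have := range_prod (counts.foldl (· + ·) 0 - 1) 1
    rw [show counts.foldl (· + ·) 0 - 1 + 1 = counts.foldl (· + ·) 0 by ring] at this
    rw [this, one_mul]; ring_nf
  rw [hf, outer_eq _ index counts _ 0 [] (by omega)]
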